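-- pv_equiv track=rewrite | github.com/mirsha-23/4-Digit-Password-Guessing-Game-Exact-Near-Match-Logic-Python | 4-DIGIT CODE.py | feedback
-- ===== SOURCE A (Python) =====
-- def feedback(secret_code, guess):
--     exact_match = 0
--     near_match = 0
--
--     # Count exact matches
--     for i in range(4):
--         if secret_code[i] == guess[i]:
--             exact_match += 1
--
--     # Count near matches
--     for digit in set(guess):
--         count_secret = secret_code.count(digit)
--         count_guess = guess.count(digit)
--         near_match += min(count_secret, count_guess)
--
--     near_match -= exact_match
--
--     return exact_match, near_match
-- ===== SOURCE B (Python) =====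
-- def feedback(secret_code, guess):
--     # Different strategy: the total per-digit overlap is the size of the
--     # multiset intersection, computed by sorting both codes and merging
--     # them with two pointers; near = that intersection size minus exact.
--     exact_match = sum(secret_code[i] == guess[i] for i in range(4))
--     s = sorted(secret_code)
--     g = sorted(guess)
--     inter = 0
--     i = j = 0
--     while i < len(s) and j < len(g):
--         if s[i] == g[j]:
--             inter += 1
--             i += 1
--             j += 1
--         elif s[i] < g[j]:
--             i += 1
--         else:
--             j += 1
--     return exact_match, inter - exact_match
-- ===== Notes on version B (the rewrite author's own statement) =====
-- stated objective: faster
-- what changed: B computes the total per-digit overlap as the size of the multiset intersection via sorting both codes and a two-pointer merge scan, instead of A's full count scans of both lists per distinct guess digit; near = intersection size minus exact.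
import Mathlib
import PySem

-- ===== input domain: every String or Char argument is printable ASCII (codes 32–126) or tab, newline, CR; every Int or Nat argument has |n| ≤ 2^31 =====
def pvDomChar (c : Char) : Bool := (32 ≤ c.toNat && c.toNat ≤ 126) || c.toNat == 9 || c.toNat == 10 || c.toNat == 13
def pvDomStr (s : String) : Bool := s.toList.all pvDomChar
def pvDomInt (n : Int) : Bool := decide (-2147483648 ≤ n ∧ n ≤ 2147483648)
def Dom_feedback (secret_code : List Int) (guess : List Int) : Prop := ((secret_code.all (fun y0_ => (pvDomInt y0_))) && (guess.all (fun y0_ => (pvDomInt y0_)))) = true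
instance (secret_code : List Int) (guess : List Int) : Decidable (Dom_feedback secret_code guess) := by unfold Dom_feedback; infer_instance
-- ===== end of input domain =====

-- B sorts both codes and counts the multiset intersection with a two-pointer merge scan,
-- instead of A's per-distinct-guess-digit count scans; near = intersection minus exact.
-- Objective: faster (sort-then-merge, O(n log n), vs A's count scans per distinct digit).


-- ===== PORT A =====
-- 'for i in range(4): if secret_code[i] == guess[i]' — pyGet? is none exactly where Python
-- raises IndexError (those inputs are excluded by Pre_); 'for digit in set(guess)' only sums,
-- so consuming the PySem.Set's elements is order-independent.
def feedback (secret_code : List Int) (guess : List Int) : Int × Int :=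
  let exact_match : Int :=
    (PySem.List.pyRange 0 4 1).foldl
      (fun acc i => if PySem.List.pyGet? secret_code i == PySem.List.pyGet? guess i then acc + 1 else acc) 0
  let near_match : Int :=
    (PySem.Set.ofList guess).foldl
      (fun acc digit => acc + min (PySem.List.count secret_code digit) (PySem.List.count guess digit)) 0
  (exact_match, near_match - exact_match)

-- ===== PORT B =====
-- B's index-based two-pointer while loop, as the structural recursion on the two suffixes
-- s[i:], g[j:] (the loop's only state besides the counter); branch order as in Source B.
def pvInterMerge : List Int → List Int → Int
  | [], _ => 0
  | _ :: _, [] => 0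
  | a :: s, b :: g =>
    if a = b then 1 + pvInterMerge s g
    else if a < b then pvInterMerge s (b :: g)
    else pvInterMerge (a :: s) g
termination_by s g => s.length + g.length

def feedback_alt (secret_code : List Int) (guess : List Int) : Int × Int :=
  let exact_match : Int :=
    (PySem.List.pyRange 0 4 1).foldl
      (fun acc i => acc + if PySem.List.pyGet? secret_code i == PySem.List.pyGet? guess i then 1 else 0) 0
  let s := PySem.List.sorted secret_code (fun x => x) false
  let g := PySem.List.sorted guess (fun x => x) false
  let inter := pvInterMerge s g
  (exact_match, inter - exact_match)

-- ===== PRECONDITION & SPEC =====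
-- Pre_ excludes exactly the inputs where A raises IndexError: a code shorter than 4.
def Pre_feedback (secret_code : List Int) (guess : List Int) : Prop :=
  4 ≤ secret_code.length ∧ 4 ≤ guess.length
instance (secret_code : List Int) (guess : List Int) : Decidable (Pre_feedback secret_code guess) := by unfold Pre_feedback; infer_instance

def pvWitness_feedback : List Int × List Int := ([1, 2, 3, 4], [1, 3, 3, 5])

def Spec_feedback (secret_code : List Int) (guess : List Int) (out : Int × Int) : Prop := out = feedback_alt secret_code guess
instance (secret_code : List Int) (guess : List Int) (out : Int × Int) : Decidable (Spec_feedback secret_code guess out) := by unfold Spec_feedback; infer_instance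

-- ===== CLAIM (what is proved, stated in full; the proofs are below) =====
def Claim_equal_feedback : Prop := ∀ (secret_code : List Int) (guess : List Int), Dom_feedback secret_code guess → Pre_feedback secret_code guess → Spec_feedback secret_code guess (feedback secret_code guess)

-- ===== LEMMAS AND PROOFS =====

-- the two-pointer merge over two ≤-sorted lists counts the multiset intersection
theorem pvInterMerge_card : ∀ (s g : List Int), s.Pairwise (· ≤ ·) → g.Pairwise (· ≤ ·) →
    pvInterMerge s g = (((s : Multiset Int) ∩ (g : Multiset Int)).card : Int) := by
  intro s g
  induction s, g using pvInterMerge.induct with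
  | case1 g => intro _ _; simp [pvInterMerge]
  | case2 a s => intro _ _; simp [pvInterMerge]
  | case3 s b g ih =>
    intro hs hg
    rw [pvInterMerge, if_pos rfl]
    rw [← Multiset.cons_coe, ← Multiset.cons_coe,
      Multiset.cons_inter_of_pos _ (Multiset.mem_cons_self b _), Multiset.erase_cons_head,
      Multiset.card_cons, ih hs.of_cons hg.of_cons]
    push_cast; ring
  | case4 a s b g hne hlt ih =>
    intro hs hg
    rw [pvInterMerge, if_neg hne, if_pos hlt]
    have hnm : a ∉ b ::ₘ ((g : List Int) : Multiset Int) := by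
      intro hmem
      rcases Multiset.mem_cons.mp hmem with h | h
      · exact absurd h hne
      · have := (List.pairwise_cons.mp hg).1 a (Multiset.mem_coe.mp h)
        omega
    rw [← Multiset.cons_coe, ← Multiset.cons_coe, Multiset.cons_inter_of_neg _ hnm,
      Multiset.cons_coe, ih hs.of_cons hg]
  | case5 a s b g hne hnlt ih =>
    intro hs hg
    rw [pvInterMerge, if_neg hne, if_neg hnlt]
    have hnm : b ∉ a ::ₘ ((s : List Int) : Multiset Int) := by
      intro hmem
      rcases Multiset.mem_cons.mp hmem with h | h
      · exact absurd h.symm hne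
      · have := (List.pairwise_cons.mp hs).1 b (Multiset.mem_coe.mp h)
        omega
    rw [← Multiset.cons_coe, ← Multiset.cons_coe, Multiset.inter_comm,
      Multiset.cons_inter_of_neg _ hnm, Multiset.inter_comm,
      Multiset.cons_coe, ih hs hg.of_cons]

-- summing a sub-multiset's counts over a nodup list covering its support gives its card
theorem pv_sum_count (M : Multiset Int) (D : List Int) (hnd : D.Nodup)
    (hsub : ∀ d, d ∈ M → d ∈ D) :
    (D.map (fun d => M.count d)).sum = M.card := by
  rw [← List.sum_toFinset _ hnd, ← Multiset.toFinset_sum_count_eq M]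
  refine (Finset.sum_subset ?_ ?_).symm
  · intro d hd
    exact List.mem_toFinset.mpr (hsub d (Multiset.mem_toFinset.mp hd))
  · intro d _ hd
    exact Multiset.count_eq_zero.mpr (fun h => hd (Multiset.mem_toFinset.mpr h))

-- A's per-distinct-guess-digit sum of min counts IS the multiset-intersection size
theorem pv_near_total (S G : List Int) :
    (PySem.Set.ofList G).foldl
      (fun acc d => acc + ((min (PySem.List.count S d) (PySem.List.count G d) : Nat) : Int)) 0
    = (((S : Multiset Int) ∩ (G : Multiset Int)).card : Int) := by
  rw [PySem.List.foldl_add, zero_add]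
  have h1 : ((PySem.Set.ofList G).map
      (fun d => ((min (PySem.List.count S d) (PySem.List.count G d) : Nat) : Int)))
      = ((PySem.Set.ofList G).map
          (fun d => min (PySem.List.count S d) (PySem.List.count G d))).map
        (fun n : Nat => (n : Int)) := by
    rw [List.map_map]; rfl
  have hmap : ((PySem.Set.ofList G).map
      (fun d => min (PySem.List.count S d) (PySem.List.count G d)))
      = (PySem.Set.ofList G).map
        (fun d => ((S : Multiset Int) ∩ (G : Multiset Int)).count d) := by
    refine List.map_congr_left (fun d _ => ?_)
    rw [Multiset.count_inter, Multiset.coe_count, Multiset.coe_count]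
    simp [PySem.List.count, List.count, BEq.comm]
  have hsum : ((PySem.Set.ofList G).map
      (fun d => min (PySem.List.count S d) (PySem.List.count G d))).sum
      = ((S : Multiset Int) ∩ (G : Multiset Int)).card := by
    rw [hmap]
    refine pv_sum_count _ _ (PySem.Set.nodup_ofList G) (fun d hd => ?_)
    have hG : d ∈ (G : Multiset Int) := (Multiset.mem_inter.mp hd).2
    exact (PySem.Set.mem_ofList G d).mpr (Multiset.mem_coe.mp hG)
  rw [h1, ← Nat.cast_list_sum, hsum]

-- ===== VERDICT (by name: the statement is the Claim_ definition above) =====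
theorem feedback_spec : Claim_equal_feedback := by
  intro S G _ _
  show feedback S G = feedback_alt S G
  simp only [feedback, feedback_alt]
  have hexact : ∀ (l : List Int) (a : Int),
      l.foldl (fun acc i => if PySem.List.pyGet? S i == PySem.List.pyGet? G i then acc + 1 else acc) a
      = l.foldl (fun acc i => acc + if PySem.List.pyGet? S i == PySem.List.pyGet? G i then 1 else 0) a := by
    intro l
    induction l with
    | nil => intro a; rfl
    | cons i l ih =>
      intro a
      simp only [List.foldl_cons]
      split_ifs
      · rw [ih]
      · rw [ih, add_zero]
  rw [hexact]
  refine Prod.ext rfl ?_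
  show (_ : Int) - _ = _ - _
  have hS : ((PySem.List.sorted S (fun x => x) : List Int) : Multiset Int) = (S : Multiset Int) :=
    Quot.sound (PySem.List.sorted_perm S (fun x => x) false)
  have hG : ((PySem.List.sorted G (fun x => x) : List Int) : Multiset Int) = (G : Multiset Int) :=
    Quot.sound (PySem.List.sorted_perm G (fun x => x) false)
  rw [pv_near_total S G, pvInterMerge_card _ _ (PySem.List.sorted_pairwise S (fun x => x))
    (PySem.List.sorted_pairwise G (fun x => x)), hS, hG]
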